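-- pv_equiv track=rewrite | github.com/sssungjooon/baekjoon-hub | 프로그래머스/unrated/181926. 수 조작하기 1/수 조작하기 1.py | solution
-- ===== SOURCE A (Python) =====
-- def solution(n, control):
--     answer = n
--     for S in control :
--         if S == "w" :
--             answer += 1
--         elif S == "s" :
--             answer -= 1
--         elif S == "d" :
--             answer += 10
--         elif S == "a" :
--             answer -= 10
--     return answer
-- ===== SOURCE B (Python) =====
-- def solution(n, control):
--     return (n + control.count("w") - control.count("s")
--               + 10 * control.count("d") - 10 * control.count("a"))
-- ===== Notes on version B (the rewrite author's own statement) =====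
-- stated objective: faster
-- what changed: Replaced the left-to-right accumulator loop with a closed-form arithmetic expression over the four str.count character counts (C-level scans instead of a Python-level loop).
import Mathlib
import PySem

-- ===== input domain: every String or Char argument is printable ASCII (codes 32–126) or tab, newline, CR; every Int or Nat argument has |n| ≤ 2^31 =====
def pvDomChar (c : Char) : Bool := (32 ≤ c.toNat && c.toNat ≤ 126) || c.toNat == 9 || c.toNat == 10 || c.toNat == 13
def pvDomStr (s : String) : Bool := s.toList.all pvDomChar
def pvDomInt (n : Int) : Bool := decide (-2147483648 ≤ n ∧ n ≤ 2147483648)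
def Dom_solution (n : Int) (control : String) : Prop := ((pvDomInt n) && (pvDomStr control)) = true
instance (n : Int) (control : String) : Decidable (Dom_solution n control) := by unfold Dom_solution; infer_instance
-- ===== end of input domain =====

-- B replaces the accumulator loop by a closed-form expression over the four character counts (simpler decomposition).


-- ===== PORT A =====
def solution (n : Int) (control : String) : Int :=
  control.toList.foldl (fun answer S =>
    if S == 'w' then answer + 1
    else if S == 's' then answer - 1
    else if S == 'd' then answer + 10
    else if S == 'a' then answer - 10
    else answer) n

-- ===== PORT B =====
def solution_alt (n : Int) (control : String) : Int :=
  n + (control.toList.count 'w' : Int) - (control.toList.count 's' : Int)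
    + 10 * (control.toList.count 'd' : Int) - 10 * (control.toList.count 'a' : Int)

-- ===== PRECONDITION & SPEC =====
def Spec_solution (n : Int) (control : String) (out : Int) : Prop := out = solution_alt n control
instance (n : Int) (control : String) (out : Int) : Decidable (Spec_solution n control out) := by unfold Spec_solution; infer_instance

-- ===== CLAIM (what is proved, stated in full; the proofs are below) =====
def Claim_equal_solution : Prop := ∀ (n : Int) (control : String), Dom_solution n control → Spec_solution n control (solution n control)

-- ===== LEMMAS AND PROOFS =====
theorem solution_foldl_counts (l : List Char) (n : Int) :
    l.foldl (fun answer S =>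
      if S == 'w' then answer + 1
      else if S == 's' then answer - 1
      else if S == 'd' then answer + 10
      else if S == 'a' then answer - 10
      else answer) n
    = n + (l.count 'w' : Int) - (l.count 's' : Int)
        + 10 * (l.count 'd' : Int) - 10 * (l.count 'a' : Int) := by
  induction l generalizing n with
  | nil => simp
  | cons c t ih =>
    simp only [List.foldl_cons, ih, List.count_cons]
    by_cases hw : c = 'w' <;> by_cases hs : c = 's' <;> by_cases hd : c = 'd' <;>
      by_cases ha : c = 'a' <;> simp_all <;> ring

-- ===== VERDICT (by name: the statement is the Claim_ definition above) =====
theorem solution_spec : Claim_equal_solution := by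
  intro n control _
  exact solution_foldl_counts control.toList n
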